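-- pv_equiv track=rewrite | github.com/ElenaVergopoulou/cryptography | Exercises2/crypto8.py | superExp
-- ===== SOURCE A (Python) =====
-- def repeatedSquaring(a,n,m):
--     x=a%m
--     y=1
--     while (n>0) :
--         if (n%2 != 0):
--             y=(y*x)%m
--         x=(x**2)%m
--         n=n//2
--     return y
--
-- def superExp(a,n,tupl):
--     t,f=tupl
--     if n==0:
--         return 1
--     if (t==0 and f==0):
--         return 0
--     elif f==0 :
--         nt=t-1
--         nf=f
--     else:
--         nt=t+1
--         nf=f-1
--     return repeatedSquaring(a,superExp(a,n-1,(nt,nf)),(2**t)*(5**f))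
-- ===== SOURCE B (Python) =====
-- def repeatedSquaring(a, n, m):
--     x = a % m
--     y = 1
--     while n > 0:
--         if n % 2 != 0:
--             y = (y * x) % m
--         x = (x ** 2) % m
--         n = n // 2
--     return y
--
--
-- def superExp(a, n, tupl):
--     # Closed form for the descent: from (t, f) the state walks (t+1, f-1)
--     # while f > 0 and then (t-1, 0), reaching (0, 0) after exactly s = t + 2*f
--     # steps; n decrements each step.  So the base value is 1 iff 0 <= n <= s
--     # (n hits 0 first), the depth is k = min of that race, and the moduli at
--     # depth i are 2**(t+i) * 5**(f-i) for i < f and 2**(t+2*f-i) afterwards.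
--     if n == 0:
--         return 1
--     t, f = tupl
--     s = t + 2 * f
--     if 0 <= n <= s:
--         value, k = 1, n
--     else:
--         value, k = 0, s
--     mods = [2 ** (t + i) * 5 ** (f - i) for i in range(min(k, f))] \
--         + [2 ** (t + 2 * f - i) for i in range(f, k)]
--     for m in reversed(mods):
--         value = repeatedSquaring(a, value, m)
--     return value
-- ===== Notes on version B (the rewrite author's own statement) =====
-- stated objective: alternative
-- what changed: superExp's recursion is replaced by a closed form: the descent depth k and the base value are computed directly from (n,t,f) (the state reaches (0,0) after exactly t+2f steps), the whole moduli list is built by two range comprehensions 2**(t+i)*5**(f-i) and 2**(t+2f-i), and repeatedSquaring is folded over it in reverse.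
-- outside the precondition, e.g. on superExp(5, 3, (-1, 2)): A returns 1, B returns 1; on superExp(5, 1, (0, -1)): A returns 0.19999999999999973, B returns 0; on superExp(5, -3, (0, -1)): A raises RecursionError, B returns 0
import Mathlib
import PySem

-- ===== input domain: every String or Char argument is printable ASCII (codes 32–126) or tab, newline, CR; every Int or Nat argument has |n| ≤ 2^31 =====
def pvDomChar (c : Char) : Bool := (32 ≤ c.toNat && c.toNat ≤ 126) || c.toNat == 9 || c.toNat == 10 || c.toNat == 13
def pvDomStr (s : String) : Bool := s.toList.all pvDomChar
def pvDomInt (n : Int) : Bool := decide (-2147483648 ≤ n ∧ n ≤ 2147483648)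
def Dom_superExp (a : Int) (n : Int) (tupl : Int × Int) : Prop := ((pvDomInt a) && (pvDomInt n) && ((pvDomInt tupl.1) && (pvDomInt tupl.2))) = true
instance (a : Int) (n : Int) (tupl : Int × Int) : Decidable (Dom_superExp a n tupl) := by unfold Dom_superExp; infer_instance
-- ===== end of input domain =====

-- B replaces superExp's recursive descent by a closed form: the depth and the whole
-- list of moduli are computed directly from (n, t, f), then repeatedSquaring is
-- folded over that list (alternative decomposition, same cost).

-- ===== PORT A =====
-- repeatedSquaring's while loop; % and // through PySem (floor semantics).
def rsLoop (m x y n : Int) : Int :=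
  if h : 0 < n then
    rsLoop m (PySem.Int.mod (x * x) m)
      (if PySem.Int.mod n 2 ≠ 0 then PySem.Int.mod (y * x) m else y)
      (PySem.Int.floordiv n 2)
  else y
termination_by n.toNat
decreasing_by
  have := PySem.Int.floordiv_lt_iff_lt_mul (a := n) (q := n) (b := 2) (by omega)
  have h2 : PySem.Int.floordiv n 2 < n := this.mpr (by omega)
  have h0 : 0 ≤ PySem.Int.floordiv n 2 :=
    (PySem.Int.le_floordiv_iff_mul_le (a := n) (q := 0) (b := 2) (by omega)).mpr (by omega)
  omega

def repeatedSquaring (a n m : Int) : Int := rsLoop m (PySem.Int.mod a m) 1 n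

-- superExp with a fuel guard making the recursion total; on Pre_ (t,f ≥ 0) the
-- fuel n.toNat + (t+2f).toNat + 1 exceeds the number of recursive steps Python takes,
-- so the fuel-0 branch is never reached there. 2**t*5**f is ported via t.toNat/f.toNat,
-- exact for t,f ≥ 0 (inside Pre_; outside, Python leaves the integers for floats).
def superExpFuel (a : Int) : Nat → Int → Int → Int → Int
  | 0, _, _, _ => 0
  | fuel + 1, n, t, f =>
    if n = 0 then 1
    else if t = 0 ∧ f = 0 then 0
    else
      let nt : Int := if f = 0 then t - 1 else t + 1
      let nf : Int := if f = 0 then f else f - 1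
      repeatedSquaring a (superExpFuel a fuel (n - 1) nt nf) (2 ^ t.toNat * 5 ^ f.toNat)

def superExp (a : Int) (n : Int) (tupl : Int × Int) : Int :=
  superExpFuel a (n.toNat + (tupl.1 + 2 * tupl.2).toNat + 1) n tupl.1 tupl.2

-- ===== PORT B =====
-- Source B: closed-form depth k and base value, the moduli built by two range
-- comprehensions (pyRange), then repeatedSquaring folded over them in reverse.
-- The Python powers 2**(t+i), 5**(f-i), 2**(t+2f-i) are ported via .toNat,
-- exact because those exponents are nonnegative on the ranges used (t,f ≥ 0 in Pre_).
def superExp_alt (a : Int) (n : Int) (tupl : Int × Int) : Int :=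
  if n = 0 then 1
  else
    let t := tupl.1
    let f := tupl.2
    let s := t + 2 * f
    let value : Int := if 0 ≤ n ∧ n ≤ s then 1 else 0
    let k : Int := if 0 ≤ n ∧ n ≤ s then n else s
    let mods : List Int :=
      (PySem.List.pyRange 0 (min k f) 1).map
        (fun i => 2 ^ (t + i).toNat * 5 ^ (f - i).toNat)
      ++ (PySem.List.pyRange f k 1).map (fun i => 2 ^ (t + 2 * f - i).toNat)
    mods.reverse.foldl (fun v m => repeatedSquaring a v m) value

-- ===== PRECONDITION & SPEC =====
-- Pre_ excludes inputs with a negative tower exponent t or f (unless n == 0, where A returns 1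
-- immediately): there Python's 2**t*5**f modulus is a float, and A returns a float, raises
-- RecursionError (n < 0), or returns an accidental int when a zero intermediate exponent
-- short-circuits repeatedSquaring.
def Pre_superExp (a : Int) (n : Int) (tupl : Int × Int) : Prop :=
  n = 0 ∨ (0 ≤ tupl.1 ∧ 0 ≤ tupl.2)
instance (a : Int) (n : Int) (tupl : Int × Int) : Decidable (Pre_superExp a n tupl) := by
  unfold Pre_superExp; infer_instance
def pvWitness_superExp : Int × Int × (Int × Int) := (3, 4, (2, 1))

def Spec_superExp (a : Int) (n : Int) (tupl : Int × Int) (out : Int) : Prop := out = superExp_alt a n tupl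
instance (a : Int) (n : Int) (tupl : Int × Int) (out : Int) : Decidable (Spec_superExp a n tupl out) := by unfold Spec_superExp; infer_instance

-- ===== CLAIM (what is proved, stated in full; the proofs are below) =====
def Claim_equal_superExp : Prop := ∀ (a : Int) (n : Int) (tupl : Int × Int), Dom_superExp a n tupl → Pre_superExp a n tupl → Spec_superExp a n tupl (superExp a n tupl)

-- ===== LEMMAS AND PROOFS =====

-- proof-side names for the pieces of B's body
def kB (n t f : Int) : Int := if 0 ≤ n ∧ n ≤ t + 2 * f then n else t + 2 * f
def baseB (n t f : Int) : Int := if 0 ≤ n ∧ n ≤ t + 2 * f then 1 else 0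
def modsB (n t f : Int) : List Int :=
  (PySem.List.pyRange 0 (min (kB n t f) f) 1).map
    (fun i => 2 ^ (t + i).toNat * 5 ^ (f - i).toNat)
  ++ (PySem.List.pyRange f (kB n t f) 1).map (fun i => 2 ^ (t + 2 * f - i).toNat)
def foldB (a n t f : Int) : Int :=
  (modsB n t f).reverse.foldl (fun v m => repeatedSquaring a v m) (baseB n t f)

theorem superExp_alt_eq_foldB (a n t f : Int) (hn : n ≠ 0) :
    superExp_alt a n (t, f) = foldB a n t f := by
  simp [superExp_alt, foldB, modsB, baseB, kB, hn]

-- the recurrence B's closed form satisfies, matching one step of A's descent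
theorem modsB_step (n t f : Int) (ht : 0 ≤ t) (hf : 0 ≤ f) (hn : n ≠ 0)
    (htf : ¬(t = 0 ∧ f = 0)) :
    modsB n t f =
      (2 ^ t.toNat * 5 ^ f.toNat) ::
        modsB (n - 1) (if f = 0 then t - 1 else t + 1) (if f = 0 then f else f - 1) := by
  have hs : 1 ≤ t + 2 * f := by omega
  have hk1 : 1 ≤ kB n t f := by unfold kB; split_ifs with h1 <;> omega
  rcases eq_or_ne f 0 with hf0 | hf0
  · subst hf0
    rw [if_pos rfl, if_pos rfl]
    have hk0 : kB (n - 1) (t - 1) 0 = kB n t 0 - 1 := by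
      unfold kB; split_ifs with h1 h2 h3 h4 h5 h6 <;> omega
    simp only [modsB, hk0]
    have hmin : min (kB n t 0) (0 : Int) = 0 := by omega
    have hmin' : min (kB n t 0 - 1) (0 : Int) = 0 := by omega
    rw [hmin, hmin', PySem.List.pyRange_one_eq_nil (le_refl 0),
        PySem.List.pyRange_one_cons (by omega : (0:Int) < kB n t 0)]
    simp only [zero_add, List.map_nil, List.nil_append, List.map_cons, List.cons.injEq]
    constructor
    · norm_num
    · rw [PySem.List.pyRange_one (a := 1), PySem.List.pyRange_one (a := 0)]
      have hlen : (kB n t 0 - 1 - 0).toNat = (kB n t 0 - 1).toNat := by omega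
      rw [hlen]
      simp only [List.map_map]
      apply List.map_congr_left
      intro j _
      have : t + 2 * 0 - (1 + (j : Int)) = t - 1 + 2 * 0 - (0 + (j : Int)) := by ring
      simp [Function.comp, this]; try omega
  · rw [if_neg hf0, if_neg hf0]
    have hf1 : 1 ≤ f := by omega
    have hkn : kB (n - 1) (t + 1) (f - 1) = kB n t f - 1 := by
      unfold kB; split_ifs with h1 h2 h3 h4 h5 h6 <;> omega
    simp only [modsB, hkn]
    have hmin : min (kB n t f - 1) (f - 1) = min (kB n t f) f - 1 := by omega
    rw [hmin, PySem.List.pyRange_one_cons (by omega : (0:Int) < min (kB n t f) f)]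
    simp only [zero_add, List.map_cons, List.cons_append, List.cons.injEq]
    refine ⟨by norm_num, ?_⟩
    congr 1
    · rw [PySem.List.pyRange_one (a := 1), PySem.List.pyRange_one (a := 0)]
      have hlen : (min (kB n t f) f - 1 - 0).toNat = (min (kB n t f) f - 1).toNat := by omega
      rw [hlen]
      simp only [List.map_map]
      apply List.map_congr_left
      intro j _
      have h1 : t + (1 + (j : Int)) = t + 1 + (0 + (j : Int)) := by ring
      have h2 : f - (1 + (j : Int)) = f - 1 - (0 + (j : Int)) := by ring
      simp [Function.comp, h1, h2]; try omega
    · rw [PySem.List.pyRange_one (a := f), PySem.List.pyRange_one (a := f - 1)]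
      have hlen : (kB n t f - 1 - (f - 1)).toNat = (kB n t f - f).toNat := by omega
      rw [hlen]
      simp only [List.map_map]
      apply List.map_congr_left
      intro j _
      have : t + 2 * f - (f + (j : Int)) = t + 1 + 2 * (f - 1) - (f - 1 + (j : Int)) := by ring
      simp [Function.comp, this]; try omega

theorem baseB_step (n t f : Int) (ht : 0 ≤ t) (hf : 0 ≤ f) (hn : n ≠ 0)
    (htf : ¬(t = 0 ∧ f = 0)) :
    baseB n t f =
      baseB (n - 1) (if f = 0 then t - 1 else t + 1) (if f = 0 then f else f - 1) := by
  unfold baseB; split_ifs with h1 h2 h3 h4 h5 h6 <;> first | rfl | omega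

-- A's fuelled recursion computes B's closed-form fold whenever the fuel exceeds the depth
theorem superExpFuel_eq_foldB (a : Int) : ∀ (fuel : Nat) (n t f : Int), 0 ≤ t → 0 ≤ f →
    (kB n t f).toNat < fuel → superExpFuel a fuel n t f = foldB a n t f := by
  intro fuel
  induction fuel with
  | zero => intro n t f _ _ h; omega
  | succ m ih =>
    intro n t f ht hf hfuel
    rcases eq_or_ne n 0 with hn | hn
    · subst hn
      have hk : kB 0 t f = 0 := by unfold kB; split_ifs with h1 <;> omega
      have hb : baseB 0 t f = 1 := by unfold baseB; split_ifs with h1 <;> omega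
      simp [superExpFuel, foldB, modsB, hk, hb,
        PySem.List.pyRange_one_eq_nil (le_refl (0:Int)),
        PySem.List.pyRange_one_eq_nil (by omega : (0:Int) ≤ f)]
    · by_cases htf : t = 0 ∧ f = 0
      · obtain ⟨ht0, hf0⟩ := htf
        subst ht0; subst hf0
        have hk : kB n 0 0 = 0 := by unfold kB; split_ifs with h1 <;> omega
        have hb : baseB n 0 0 = 0 := by unfold baseB; split_ifs with h1 <;> omega
        simp [superExpFuel, foldB, modsB, hk, hb, hn,
          PySem.List.pyRange_one_eq_nil (le_refl (0:Int))]
      · have hk1 : 1 ≤ kB n t f := by unfold kB; split_ifs with h1 <;> omega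
        have hk' : kB (n - 1) (if f = 0 then t - 1 else t + 1) (if f = 0 then f else f - 1)
            = kB n t f - 1 := by
          unfold kB; split_ifs with h1 h2 h3 h4 h5 h6 <;> omega
        have ht' : 0 ≤ (if f = 0 then t - 1 else t + 1) := by split_ifs with h <;> omega
        have hf' : 0 ≤ (if f = 0 then f else f - 1) := by split_ifs with h <;> omega
        have ihr := ih (n - 1) (if f = 0 then t - 1 else t + 1) (if f = 0 then f else f - 1)
          ht' hf' (by omega)
        simp only [superExpFuel, if_neg hn, if_neg htf]
        rw [ihr]
        unfold foldB
        rw [modsB_step n t f ht hf hn htf, baseB_step n t f ht hf hn htf]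
        simp [List.foldl_append]

-- ===== VERDICT (by name: the statement is the Claim_ definition above) =====
theorem superExp_spec : Claim_equal_superExp := by
  intro a n tupl _ hpre
  obtain ⟨t, f⟩ := tupl
  unfold Spec_superExp
  rcases eq_or_ne n 0 with hn | hn
  · subst hn
    simp [superExp, superExp_alt, superExpFuel]
  · rcases hpre with h0 | ⟨ht, hf⟩
    · exact absurd h0 hn
    · rw [superExp_alt_eq_foldB a n t f hn]
      unfold superExp
      apply superExpFuel_eq_foldB a _ n t f ht hf
      simp only [kB]
      split_ifs with h1 <;> omega
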